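-- pv_equiv track=rewrite | github.com/Otoast/what-is-this-called | agent_logic.py | evaluate_voronoi
-- ===== SOURCE A (Python) =====
-- import math
-- from collections import deque
--
-- def in_bounds(x, y, grid):
--     return 0 <= x < len(grid[0]) and 0 <= y < len(grid)
--
-- def valid_move(grid, x, y):
--     """A valid move is within bounds and not already occupied."""
--     return in_bounds(x, y, grid) and grid[y][x] == '.'
--
-- def bfs_distance_map(grid, start):
--     """Compute distances from start to every cell using BFS."""
--     h, w = len(grid), len(grid[0])
--     dist = [[math.inf] * w for _ in range(h)]
--     sx, sy = start
--     if not in_bounds(sx, sy, grid) or grid[sy][sx] != '.':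
--         return dist
--     dist[sy][sx] = 0
--     q = deque([(sx, sy)])
--     while q:
--         x, y = q.popleft()
--         for dx, dy in [(1, 0), (-1, 0), (0, 1), (0, -1)]:
--             nx, ny = x + dx, y + dy
--             if valid_move(grid, nx, ny) and dist[ny][nx] > dist[y][x] + 1:
--                 dist[ny][nx] = dist[y][x] + 1
--                 q.append((nx, ny))
--     return dist
--
-- def open_neighbor_bonus(grid, x, y):
--     """Count number of open adjacent cells (used in evaluation)."""
--     return sum(1 for dx, dy in [(1, 0), (-1, 0), (0, 1), (0, -1)] if valid_move(grid, x + dx, y + dy))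
--
-- def evaluate_voronoi(grid, my_head, opponent_head):
--     """Voronoi area control heuristic with openness bias."""
--     red_dist = bfs_distance_map(grid, my_head)
--     blue_dist = bfs_distance_map(grid, opponent_head)
--     score = 0
--     for y in range(len(grid)):
--         for x in range(len(grid[0])):
--             if grid[y][x] != '.':
--                 continue
--             rd, bd = red_dist[y][x], blue_dist[y][x]
--             if rd < bd:
--                 score += 1 + open_neighbor_bonus(grid, x, y)
--             elif bd < rd:
--                 score -= 1 + open_neighbor_bonus(grid, x, y)
--     return score
-- ===== SOURCE B (Python) =====
-- def evaluate_voronoi(grid, my_head, opponent_head):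
--     """Voronoi area control heuristic with openness bias.
--
--     Single combined level-synchronous BFS: expand both territories one ring per
--     round, labelling each open cell with its owner (+1 red / -1 blue) the first
--     time it is reached; a cell reached by both in the same round is a tie and
--     gets no label.  h*w rounds always suffice, since every BFS distance in the
--     grid is below h*w.
--     """
--     h, w = len(grid), len(grid[0])
--
--     def open_cell(c):
--         x, y = c
--         return 0 <= x < w and 0 <= y < h and grid[y][x] == '.'
--
--     def neighbors(c):
--         x, y = c
--         return [(x + 1, y), (x - 1, y), (x, y + 1), (x, y - 1)]
--
--     seen_r = {my_head} if open_cell(my_head) else set()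
--     seen_b = {opponent_head} if open_cell(opponent_head) else set()
--     front_r, front_b = set(seen_r), set(seen_b)
--     owner = {}
--     for c in front_r - front_b:
--         owner[c] = 1
--     for c in front_b - front_r:
--         owner[c] = -1
--     for _ in range(h * w):
--         new_r = {n for c in front_r for n in neighbors(c) if open_cell(n)} - seen_r
--         new_b = {n for c in front_b for n in neighbors(c) if open_cell(n)} - seen_b
--         for c in new_r:
--             if c not in seen_b and c not in new_b:
--                 owner[c] = 1
--         for c in new_b:
--             if c not in seen_r and c not in new_r:
--                 owner[c] = -1
--         seen_r |= new_r
--         seen_b |= new_b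
--         front_r, front_b = new_r, new_b
--     score = 0
--     for y in range(h):
--         for x in range(w):
--             if grid[y][x] == '.':
--                 bonus = sum(1 for n in neighbors((x, y)) if open_cell(n))
--                 score += owner.get((x, y), 0) * (1 + bonus)
--     return score
-- ===== Notes on version B (the rewrite author's own statement) =====
-- stated objective: alternative
-- what changed: Replaces A's two independent deque-based BFS distance matrices plus a per-cell distance comparison by one combined level-synchronous frontier-set BFS that labels each open cell with its owner (+1 red / -1 blue, same-round ties left unlabelled) the first time a wavefront reaches it; the final scan just multiplies the stored label by 1+bonus.
import Mathlib
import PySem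

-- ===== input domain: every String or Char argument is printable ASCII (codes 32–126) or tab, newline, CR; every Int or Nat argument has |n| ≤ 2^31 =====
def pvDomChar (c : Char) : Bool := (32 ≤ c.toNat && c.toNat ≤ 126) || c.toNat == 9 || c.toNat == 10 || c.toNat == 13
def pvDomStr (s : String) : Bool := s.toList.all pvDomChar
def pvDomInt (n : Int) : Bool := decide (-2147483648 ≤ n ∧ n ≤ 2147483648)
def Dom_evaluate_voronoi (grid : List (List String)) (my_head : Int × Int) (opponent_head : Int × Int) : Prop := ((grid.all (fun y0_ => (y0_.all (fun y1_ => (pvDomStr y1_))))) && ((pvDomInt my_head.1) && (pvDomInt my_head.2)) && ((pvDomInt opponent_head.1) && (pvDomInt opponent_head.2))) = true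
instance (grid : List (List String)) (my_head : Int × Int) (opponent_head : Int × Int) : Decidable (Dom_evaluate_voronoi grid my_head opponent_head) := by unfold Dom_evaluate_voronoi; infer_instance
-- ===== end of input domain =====

-- B replaces A's two deque-BFS distance matrices + per-cell distance comparison by one combined
-- level-synchronous frontier-set BFS that labels each open cell with its owner (+1/-1, ties get no
-- label) the first time a wavefront reaches it (objective: alternative algorithm, similar cost).

-- ===== PORT A =====
def pvDirs : List (Int × Int) := [(1,0),(-1,0),(0,1),(0,-1)]

-- len(grid[0]); Pre_ guarantees grid ≠ [], so headD is exact
def pvW (grid : List (List String)) : Int := ((grid.headD []).length : Int)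

def in_bounds (x y : Int) (grid : List (List String)) : Bool :=
  decide (0 ≤ x) && decide (x < pvW grid) && decide (0 ≤ y) && decide (y < (grid.length : Int))

-- grid[y][x]; every call site is guarded by in_bounds (so 0 ≤ x,y and Pre_ makes the row long
-- enough), where getD with toNat is exactly Python's indexing
def pvCell (grid : List (List String)) (x y : Int) : String :=
  (grid.getD y.toNat []).getD x.toNat ""

def valid_move (grid : List (List String)) (x y : Int) : Bool :=
  in_bounds x y grid && (pvCell grid x y == ".")

def open_neighbor_bonus (grid : List (List String)) (x y : Int) : Int :=
  pvDirs.foldl (fun acc d => if valid_move grid (x + d.1) (y + d.2) then acc + 1 else acc) 0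

-- dist values: none = math.inf, some v = the int v
def pvLt : Option Nat → Option Nat → Bool
  | none, _ => false
  | some _, none => true
  | some a, some b => decide (a < b)

def pvSucc : Option Nat → Option Nat
  | none => none
  | some v => some (v + 1)

-- dist[y][x]; all reads/writes happen at in_bounds coordinates, where toNat indexing is exact
def pvMget (dist : List (List (Option Nat))) (x y : Int) : Option Nat :=
  (dist.getD y.toNat []).getD x.toNat none

def pvMset (dist : List (List (Option Nat))) (x y : Int) (v : Option Nat) :
    List (List (Option Nat)) :=
  dist.set y.toNat ((dist.getD y.toNat []).set x.toNat v)

-- the while-q loop; fuel only makes the recursion total (lemmas below prove the queue empties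
-- strictly before the fuel provided by bfs_distance_map runs out)
def pvBfsLoop (grid : List (List String)) :
    Nat → List (List (Option Nat)) → List (Int × Int) → List (List (Option Nat))
  | _, dist, [] => dist
  | 0, dist, _ :: _ => dist
  | fuel + 1, dist, c :: q =>
      let st := pvDirs.foldl (fun (st : List (List (Option Nat)) × List (Int × Int)) d =>
        let nx := c.1 + d.1
        let ny := c.2 + d.2
        if valid_move grid nx ny && pvLt (pvSucc (pvMget st.1 c.1 c.2)) (pvMget st.1 nx ny)
        then (pvMset st.1 nx ny (pvSucc (pvMget st.1 c.1 c.2)), st.2 ++ [(nx, ny)])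
        else st) (dist, q)
      pvBfsLoop grid fuel st.1 st.2

def bfs_distance_map (grid : List (List String)) (start : Int × Int) :
    List (List (Option Nat)) :=
  let h := grid.length
  let w := (grid.headD []).length
  let dist : List (List (Option Nat)) := List.replicate h (List.replicate w none)
  if !(in_bounds start.1 start.2 grid) || !(pvCell grid start.1 start.2 == ".")
  then dist
  else pvBfsLoop grid (h * w * (h * w) + 2) (pvMset dist start.1 start.2 (some 0)) [start]

def evaluate_voronoi (grid : List (List String)) (my_head : Int × Int) (opponent_head : Int × Int) : Int :=
  let red := bfs_distance_map grid my_head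
  let blue := bfs_distance_map grid opponent_head
  (PySem.List.pyRange 0 (grid.length : Int) 1).foldl (fun score y =>
    (PySem.List.pyRange 0 (pvW grid) 1).foldl (fun score x =>
      if !(pvCell grid x y == ".") then score
      else
        if pvLt (pvMget red x y) (pvMget blue x y) then
          score + (1 + open_neighbor_bonus grid x y)
        else if pvLt (pvMget blue x y) (pvMget red x y) then
          score - (1 + open_neighbor_bonus grid x y)
        else score) score) 0

-- ===== PORT B =====
def pvOpenB (grid : List (List String)) (c : Int × Int) : Bool :=
  decide (0 ≤ c.1) && decide (c.1 < pvW grid) && decide (0 ≤ c.2) &&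
    decide (c.2 < (grid.length : Int)) && (pvCell grid c.1 c.2 == ".")

def pvNbrs (c : Int × Int) : List (Int × Int) :=
  [(c.1 + 1, c.2), (c.1 - 1, c.2), (c.1, c.2 + 1), (c.1, c.2 - 1)]

-- {n for c in front for n in neighbors(c) if open_cell(n)} - seen
def pvRing (grid : List (List String)) (front seen : PySem.Set (Int × Int)) :
    PySem.Set (Int × Int) :=
  PySem.Set.diff
    (front.foldl (fun s c =>
      (pvNbrs c).foldl (fun s n => if pvOpenB grid n then PySem.Set.add s n else s) s)
      PySem.Set.empty)
    seen

structure PvSt where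
  fr : PySem.Set (Int × Int)
  fb : PySem.Set (Int × Int)
  sr : PySem.Set (Int × Int)
  sb : PySem.Set (Int × Int)
  ow : PySem.Dict (Int × Int) Int

def pvRound (grid : List (List String)) (st : PvSt) : PvSt :=
  let new_r := pvRing grid st.fr st.sr
  let new_b := pvRing grid st.fb st.sb
  let ow1 := new_r.foldl (fun ow c =>
    if !(PySem.Set.contains st.sb c) && !(PySem.Set.contains new_b c)
    then PySem.Dict.insert ow c 1 else ow) st.ow
  let ow2 := new_b.foldl (fun ow c =>
    if !(PySem.Set.contains st.sr c) && !(PySem.Set.contains new_r c)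
    then PySem.Dict.insert ow c (-1) else ow) ow1
  ⟨new_r, new_b, PySem.Set.union st.sr new_r, PySem.Set.union st.sb new_b, ow2⟩

def evaluate_voronoi_alt (grid : List (List String)) (my_head : Int × Int) (opponent_head : Int × Int) : Int :=
  let h := grid.length
  let w := (grid.headD []).length
  let sr0 : PySem.Set (Int × Int) :=
    if pvOpenB grid my_head then PySem.Set.add PySem.Set.empty my_head else PySem.Set.empty
  let sb0 : PySem.Set (Int × Int) :=
    if pvOpenB grid opponent_head then PySem.Set.add PySem.Set.empty opponent_head else PySem.Set.empty
  let ow0 := (PySem.Set.diff sr0 sb0).foldl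
    (fun ow c => PySem.Dict.insert ow c 1) PySem.Dict.empty
  let ow1 := (PySem.Set.diff sb0 sr0).foldl
    (fun ow c => PySem.Dict.insert ow c (-1)) ow0
  let st := (List.range (h * w)).foldl (fun st _ => pvRound grid st) ⟨sr0, sb0, sr0, sb0, ow1⟩
  (PySem.List.pyRange 0 (h : Int) 1).foldl (fun score y =>
    (PySem.List.pyRange 0 (w : Int) 1).foldl (fun score x =>
      if pvCell grid x y == "." then
        score + (PySem.Dict.getD st.ow (x, y) 0) *
          (1 + (((pvNbrs (x, y)).filter (fun n => pvOpenB grid n)).length : Int))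
      else score) score) 0

-- ===== PRECONDITION & SPEC =====
-- Pre_ excludes exactly the inputs on which Python A raises IndexError: the empty grid
-- (len(grid[0])) and grids whose some row is shorter than row 0 (grid[y][x] in the scan).
def Pre_evaluate_voronoi (grid : List (List String)) (my_head : Int × Int) (opponent_head : Int × Int) : Prop :=
  grid ≠ [] ∧ ∀ row ∈ grid, (grid.headD []).length ≤ row.length

instance (grid : List (List String)) (my_head : Int × Int) (opponent_head : Int × Int) : Decidable (Pre_evaluate_voronoi grid my_head opponent_head) := by
  unfold Pre_evaluate_voronoi; infer_instance

def pvWitness_evaluate_voronoi : List (List String) × (Int × Int) × (Int × Int) :=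
  ([[".", "."], [".", "."]], (0, 0), (1, 1))

def Spec_evaluate_voronoi (grid : List (List String)) (my_head : Int × Int) (opponent_head : Int × Int) (out : Int) : Prop := out = evaluate_voronoi_alt grid my_head opponent_head
instance (grid : List (List String)) (my_head : Int × Int) (opponent_head : Int × Int) (out : Int) : Decidable (Spec_evaluate_voronoi grid my_head opponent_head out) := by unfold Spec_evaluate_voronoi; infer_instance

-- ===== CLAIM (what is proved, stated in full; the proofs are below) =====
def Claim_equal_evaluate_voronoi : Prop := ∀ (grid : List (List String)) (my_head : Int × Int) (opponent_head : Int × Int), Dom_evaluate_voronoi grid my_head opponent_head → Pre_evaluate_voronoi grid my_head opponent_head → Spec_evaluate_voronoi grid my_head opponent_head (evaluate_voronoi grid my_head opponent_head)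

-- ===== LEMMAS AND PROOFS =====

-- ---- shared BFS specification: reachF grid s k c ↔ cell c is open and within BFS
-- distance k of s (which must itself be an open in-bounds cell) ----
def reachF (grid : List (List String)) (s : Int × Int) : Nat → (Int × Int) → Bool
  | 0, c => c == s && valid_move grid s.1 s.2
  | k + 1, c => reachF grid s k c ||
      (valid_move grid c.1 c.2 && pvDirs.any (fun d => reachF grid s k (c.1 - d.1, c.2 - d.2)))

-- first k ≤ r with reachF grid s k c
def fstR (grid : List (List String)) (s : Int × Int) : Nat → (Int × Int) → Option Nat
  | 0, c => if reachF grid s 0 c then some 0 else none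
  | r + 1, c =>
      match fstR grid s r c with
      | some j => some j
      | none => if reachF grid s (r + 1) c then some (r + 1) else none

def expOwner (grid : List (List String)) (mh oh : Int × Int) (r : Nat) (c : Int × Int) :
    Option Int :=
  match fstR grid mh r c, fstR grid oh r c with
  | some i, some j => if i < j then some 1 else if j < i then some (-1) else none
  | some _, none => some 1
  | none, some _ => some (-1)
  | none, none => none

def pvInb (grid : List (List String)) (c : Int × Int) : Prop :=
  0 ≤ c.1 ∧ c.1 < pvW grid ∧ 0 ≤ c.2 ∧ c.2 < (grid.length : Int)

def mgetN (dist : List (List (Option Nat))) (i j : Nat) : Option Nat :=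
  (dist.getD j []).getD i none

def rowAgg (g : Option Nat → Nat) (dist : List (List (Option Nat))) : Nat :=
  (dist.map (fun row => (row.map g).sum)).sum

def finCount (dist : List (List (Option Nat))) : Nat :=
  rowAgg (fun e => if e.isSome then 1 else 0) dist

def pvCap (K : Nat) : Option Nat → Nat
  | none => K
  | some v => min v K

def matSum (K : Nat) (dist : List (List (Option Nat))) : Nat :=
  rowAgg (pvCap K) dist

theorem sum_map_set {α : Type} (f : α → Nat) (l : List α) (n : Nat) (a d0 : α)
    (h : n < l.length) :
    ((l.set n a).map f).sum + f (l.getD n d0) = (l.map f).sum + f a := by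
  induction l generalizing n with
  | nil => simp at h
  | cons b l ih =>
    cases n with
    | zero => simp [List.set_cons_zero]; omega
    | succ n =>
      simp only [List.set_cons_succ, List.map_cons, List.sum_cons, List.getD_cons_succ]
      have := ih n (by simpa using h)
      omega

theorem mgetN_set (d : List (List (Option Nat))) (i0 j0 : Nat) (v : Option Nat)
    (i j : Nat) (hj0 : j0 < d.length) (hi0 : i0 < (d.getD j0 []).length) :
    mgetN (d.set j0 ((d.getD j0 []).set i0 v)) i j =
      if i = i0 ∧ j = j0 then v else mgetN d i j := by
  unfold mgetN
  have hdj : d[j0]? = some (d.getD j0 []) := by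
    rw [List.getElem?_eq_getElem hj0, List.getD_eq_getElem?_getD,
      List.getElem?_eq_getElem hj0]
    rfl
  by_cases hj : j = j0
  · subst hj
    have hrow : (d.set j ((d.getD j []).set i0 v)).getD j [] = (d.getD j []).set i0 v := by
      rw [List.getD_eq_getElem?_getD, List.getElem?_set, if_pos rfl, if_pos hj0]
      rfl
    rw [hrow]
    by_cases hi : i = i0
    · subst hi
      rw [if_pos ⟨rfl, rfl⟩, List.getD_eq_getElem?_getD, List.getElem?_set, if_pos rfl,
        if_pos (by simpa using hi0)]
      rfl
    · rw [if_neg (by rintro ⟨h1, _⟩; exact hi h1), List.getD_eq_getElem?_getD,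
        List.getElem?_set, if_neg (fun hc => hi hc.symm), ← List.getD_eq_getElem?_getD]
  · have hrow : (d.set j0 ((d.getD j0 []).set i0 v)).getD j [] = d.getD j [] := by
      rw [List.getD_eq_getElem?_getD, List.getElem?_set, if_neg (fun hc => hj hc.symm),
        ← List.getD_eq_getElem?_getD]
    rw [hrow, if_neg (by rintro ⟨_, h2⟩; exact hj h2)]

theorem rowAgg_set (g : Option Nat → Nat) (d : List (List (Option Nat)))
    (i0 j0 : Nat) (v : Option Nat) (hj0 : j0 < d.length)
    (hi0 : i0 < (d.getD j0 []).length) :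
    rowAgg g (d.set j0 ((d.getD j0 []).set i0 v)) + g (mgetN d i0 j0) =
      rowAgg g d + g v := by
  unfold rowAgg mgetN
  have h1 := sum_map_set (fun row => (row.map g).sum) d j0 ((d.getD j0 []).set i0 v) [] hj0
  have h2 := sum_map_set g (d.getD j0 []) i0 v none hi0
  simp only [] at h1
  omega

theorem rowAgg_le (g : Option Nat → Nat) (B : Nat) (hB : ∀ e, g e ≤ B)
    (d : List (List (Option Nat))) (W : Nat) (hW : ∀ row ∈ d, row.length = W) :
    rowAgg g d ≤ d.length * (W * B) := by
  unfold rowAgg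
  induction d with
  | nil => simp
  | cons row d ih =>
    simp only [List.map_cons, List.sum_cons, List.length_cons]
    have h1 : (row.map g).sum ≤ W * B := by
      calc (row.map g).sum ≤ (row.map g).length * B := by
            apply List.sum_le_card_nsmul
            intro x hx
            rcases List.mem_map.mp hx with ⟨e, _, rfl⟩
            exact hB e
        _ = W * B := by rw [List.length_map, hW row List.mem_cons_self]
    have h2 := ih (fun r hr => hW r (List.mem_cons_of_mem _ hr))
    exact le_trans (add_le_add h1 h2) (le_of_eq (by ring))

-- ---- A-side loop invariant ----
structure AInv (grid : List (List String)) (s : Int × Int)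
    (dist : List (List (Option Nat))) (q : List (Int × Int)) : Prop where
  sInb : pvInb grid s
  shape_h : dist.length = grid.length
  shape_w : ∀ row ∈ dist, row.length = (grid.headD []).length
  achieve : ∀ i j v, mgetN dist i j = some v → reachF grid s v ((i : Int), (j : Int)) = true
  count : ∀ i j v, mgetN dist i j = some v → v + 1 ≤ finCount dist
  source : pvMget dist s.1 s.2 = some 0
  qmem : ∀ c ∈ q, pvInb grid c ∧ (pvMget dist c.1 c.2).isSome = true
  relax : ∀ c : Int × Int, pvInb grid c → c ∉ q → ∀ v, pvMget dist c.1 c.2 = some v →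
      ∀ d ∈ pvDirs, valid_move grid (c.1 + d.1) (c.2 + d.2) = true →
      ∃ w, w ≤ v + 1 ∧ pvMget dist (c.1 + d.1) (c.2 + d.2) = some w

theorem pvMget_eq_mgetN (d : List (List (Option Nat))) (x y : Int) :
    pvMget d x y = mgetN d x.toNat y.toNat := rfl

theorem inb_cast {grid : List (List String)} {c : Int × Int} (h : pvInb grid c) :
    ((c.1.toNat : Int), (c.2.toNat : Int)) = c := by
  obtain ⟨h1, _, h3, _⟩ := h
  exact Prod.ext (by simp [Int.toNat_of_nonneg h1]) (by simp [Int.toNat_of_nonneg h3])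

theorem inb_toNat_lt {grid : List (List String)} {c : Int × Int} (h : pvInb grid c) :
    c.1.toNat < (grid.headD []).length ∧ c.2.toNat < grid.length := by
  obtain ⟨h1, h2, h3, h4⟩ := h
  unfold pvW at h2
  omega

theorem inb_ne_toNat {grid : List (List String)} {c n : Int × Int} (hc : pvInb grid c)
    (hn : pvInb grid n) (hne : c ≠ n) :
    ¬ (c.1.toNat = n.1.toNat ∧ c.2.toNat = n.2.toNat) := by
  obtain ⟨a1, _, a3, _⟩ := hc
  obtain ⟨b1, _, b3, _⟩ := hn
  rintro ⟨e1, e2⟩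
  exact hne (Prod.ext (by omega) (by omega))

theorem row_len {grid : List (List String)} {dist : List (List (Option Nat))}
    (hh : dist.length = grid.length)
    (hw : ∀ row ∈ dist, row.length = (grid.headD []).length)
    {j : Nat} (hj : j < grid.length) :
    (dist.getD j []).length = (grid.headD []).length := by
  have hjd : j < dist.length := by omega
  rw [List.getD_eq_getElem?_getD, List.getElem?_eq_getElem hjd]
  exact hw _ (List.getElem_mem hjd)

theorem finCount_le {grid : List (List String)} {dist : List (List (Option Nat))}
    (hh : dist.length = grid.length)
    (hw : ∀ row ∈ dist, row.length = (grid.headD []).length) :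
    finCount dist ≤ grid.length * (grid.headD []).length := by
  have := rowAgg_le (fun e => if e.isSome then 1 else 0) 1 (fun e => by by_cases he : e.isSome = true <;> simp [he])
    dist ((grid.headD []).length) hw
  unfold finCount
  calc rowAgg _ dist ≤ dist.length * ((grid.headD []).length * 1) := this
    _ = grid.length * (grid.headD []).length := by rw [hh]; ring

-- the value written/read by pvMset/pvMget at in-bounds cells, in mgetN form
theorem mget_mset_inb {grid : List (List String)} {dist : List (List (Option Nat))}
    (hh : dist.length = grid.length)
    (hw : ∀ row ∈ dist, row.length = (grid.headD []).length)
    {n : Int × Int} (hn : pvInb grid n) (v : Option Nat) (i j : Nat) :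
    mgetN (pvMset dist n.1 n.2 v) i j =
      if i = n.1.toNat ∧ j = n.2.toNat then v else mgetN dist i j := by
  have hlt := inb_toNat_lt hn
  exact mgetN_set dist n.1.toNat n.2.toNat v i j (by omega)
    (by rw [row_len hh hw hlt.2]; exact hlt.1)

-- basic facts about reachF
theorem reach_open {grid : List (List String)} {s : Int × Int} {k : Nat} {c : Int × Int}
    (h : reachF grid s k c = true) : valid_move grid c.1 c.2 = true := by
  induction k generalizing c with
  | zero =>
    simp [reachF] at h
    obtain ⟨h1, h2⟩ := h
    subst h1; exact h2
  | succ k ih =>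
    simp [reachF] at h
    rcases h with h | ⟨h1, _⟩
    · exact ih h
    · exact h1

theorem reach_succ {grid : List (List String)} {s : Int × Int} {k : Nat} {c : Int × Int}
    (h : reachF grid s k c = true) : reachF grid s (k + 1) c = true := by
  simp [reachF, h]

theorem reach_mono {grid : List (List String)} {s : Int × Int} {k k' : Nat} {c : Int × Int}
    (hk : k ≤ k') (h : reachF grid s k c = true) : reachF grid s k' c = true := by
  induction k' with
  | zero =>
    have : k = 0 := by omega
    subst this; exact h
  | succ k' ih =>
    rcases Nat.le_succ_iff.mp hk with h' | h'
    · exact reach_succ (ih h')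
    · subst h'; exact h

theorem valid_inb {grid : List (List String)} {x y : Int}
    (h : valid_move grid x y = true) : pvInb grid (x, y) := by
  simp [valid_move, in_bounds, pvInb] at h ⊢
  exact ⟨h.1.1.1.1, h.1.1.1.2, h.1.1.2, h.1.2⟩

theorem reach_succ_eq {grid : List (List String)} (s : Int × Int) (r : Nat) (c : Int × Int) :
    reachF grid s (r + 1) c = (reachF grid s r c ||
      (valid_move grid c.1 c.2 && pvDirs.any (fun d => reachF grid s r (c.1 - d.1, c.2 - d.2)))) :=
  rfl

theorem reach_zero_iff {grid : List (List String)} {s c : Int × Int} :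
    reachF grid s 0 c = true ↔ (c = s ∧ valid_move grid s.1 s.2 = true) := by
  show (c == s && valid_move grid s.1 s.2) = true ↔ _
  simp

theorem pvMset_def (d : List (List (Option Nat))) (x y : Int) (v : Option Nat) :
    pvMset d x y v = d.set y.toNat ((d.getD y.toNat []).set x.toNat v) := rfl

theorem step_preserve {grid : List (List String)} {s c n : Int × Int} {vu : Nat}
    {dist : List (List (Option Nat))} {q : List (Int × Int)}
    (hInv : AInv grid s dist (c :: q)) (hcur : pvMget dist c.1 c.2 = some vu)
    (hd : ∃ d ∈ pvDirs, n = (c.1 + d.1, c.2 + d.2))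
    (hvalid : valid_move grid n.1 n.2 = true)
    (hguard : pvLt (some (vu + 1)) (pvMget dist n.1 n.2) = true) :
    AInv grid s (pvMset dist n.1 n.2 (some (vu + 1))) (c :: (q ++ [n])) ∧
    pvMget (pvMset dist n.1 n.2 (some (vu + 1))) c.1 c.2 = some vu ∧
    matSum (grid.length * (grid.headD []).length) (pvMset dist n.1 n.2 (some (vu + 1))) + 1
      ≤ matSum (grid.length * (grid.headD []).length) dist ∧
    (∀ a b : Nat, ∀ w, mgetN dist a b = some w →
      ∃ w', mgetN (pvMset dist n.1 n.2 (some (vu + 1))) a b = some w' ∧ w' ≤ w) := by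
  obtain ⟨d, hdmem, hneq⟩ := hd
  have hcinb : pvInb grid c := (hInv.qmem c List.mem_cons_self).1
  have hninb : pvInb grid n := valid_inb hvalid
  have hlt := inb_toNat_lt hninb
  have hget' : ∀ i j, mgetN (pvMset dist n.1 n.2 (some (vu + 1))) i j =
      if i = n.1.toNat ∧ j = n.2.toNat then some (vu + 1) else mgetN dist i j :=
    mget_mset_inb hInv.shape_h hInv.shape_w hninb _
  have hold : ∀ w, mgetN dist n.1.toNat n.2.toNat = some w → vu + 1 < w := by
    intro w hw
    rw [pvMget_eq_mgetN, hw] at hguard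
    simpa [pvLt] using hguard
  have hcne : c ≠ n := by
    rw [hneq]
    intro hh
    have h1 := congrArg Prod.fst hh
    have h2 := congrArg Prod.snd hh
    simp at h1 h2
    fin_cases hdmem <;> omega
  have hcn : ¬ (c.1.toNat = n.1.toNat ∧ c.2.toNat = n.2.toNat) :=
    inb_ne_toNat hcinb hninb hcne
  have hsn : s ≠ n := by
    intro hh
    have h0 : mgetN dist n.1.toNat n.2.toNat = some 0 := by
      rw [← pvMget_eq_mgetN, ← hh]; exact hInv.source
    exact absurd (hold 0 h0) (by omega)
  have hsn' : ¬ (s.1.toNat = n.1.toNat ∧ s.2.toNat = n.2.toNat) :=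
    inb_ne_toNat hInv.sInb hninb hsn
  have hsh : (pvMset dist n.1 n.2 (some (vu + 1))).length = grid.length := by
    rw [pvMset_def, List.length_set]; exact hInv.shape_h
  have hsw : ∀ row ∈ pvMset dist n.1 n.2 (some (vu + 1)),
      row.length = (grid.headD []).length := by
    intro row hrow
    rw [pvMset_def] at hrow
    rcases List.mem_or_eq_of_mem_set hrow with h | h
    · exact hInv.shape_w _ h
    · subst h; rw [List.length_set]; exact row_len hInv.shape_h hInv.shape_w hlt.2
  have hjlt : n.2.toNat < dist.length := by
    rw [hInv.shape_h]; exact hlt.2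
  have hilt : n.1.toNat < (dist.getD n.2.toNat []).length := by
    rw [row_len hInv.shape_h hInv.shape_w hlt.2]; exact hlt.1
  have hcurN : mgetN dist c.1.toNat c.2.toNat = some vu := by
    rw [← pvMget_eq_mgetN]; exact hcur
  have hfin := rowAgg_set (fun e => if e.isSome then 1 else 0) dist n.1.toNat n.2.toNat
    (some (vu + 1)) hjlt hilt
  rw [← pvMset_def] at hfin
  unfold finCount at *
  -- the new finCount bound for the value vu + 1
  have hnewcnt : vu + 1 + 1 ≤ rowAgg (fun e => if e.isSome then 1 else 0)
      (pvMset dist n.1 n.2 (some (vu + 1))) := by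
    cases hov : mgetN dist n.1.toNat n.2.toNat with
    | none =>
      have hc1 := hInv.count _ _ _ hcurN
      unfold finCount at hc1
      rw [hov] at hfin
      simp at hfin
      omega
    | some o =>
      have hc1 := hInv.count _ _ _ hov
      unfold finCount at hc1
      have ho := hold o hov
      rw [hov] at hfin
      simp at hfin
      omega
  have hmono : rowAgg (fun e => if e.isSome then 1 else 0) dist ≤
      rowAgg (fun e => if e.isSome then 1 else 0) (pvMset dist n.1 n.2 (some (vu + 1))) := by
    cases hov : mgetN dist n.1.toNat n.2.toNat with
    | none => rw [hov] at hfin; simp at hfin; omega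
    | some o => rw [hov] at hfin; simp at hfin; omega
  have hsome : ∀ a b, (mgetN dist a b).isSome = true →
      (mgetN (pvMset dist n.1 n.2 (some (vu + 1))) a b).isSome = true := by
    intro a b hab
    rw [hget']
    split
    · rfl
    · exact hab
  have hK := finCount_le hsh hsw
  unfold finCount at hK
  refine ⟨⟨hInv.sInb, hsh, hsw, ?_, ?_, ?_, ?_, ?_⟩, ?_, ?_, ?_⟩
  · -- achieve
    intro i j v' hv'
    rw [hget'] at hv'
    split at hv'
    · rename_i hij
      cases hv'
      rw [show ((i : Int), (j : Int)) = n by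
        rw [hij.1, hij.2]; exact inb_cast hninb]
      rw [reach_succ_eq]
      simp only [Bool.or_eq_true, Bool.and_eq_true, List.any_eq_true]
      refine Or.inr ⟨hvalid, d, hdmem, ?_⟩
      have : (n.1 - d.1, n.2 - d.2) = c := by
        rw [hneq]; exact Prod.ext (by simp) (by simp)
      rw [this]
      have := hInv.achieve _ _ _ hcurN
      rwa [inb_cast hcinb] at this
    · exact hInv.achieve _ _ _ hv'
  · -- count
    intro i j v' hv'
    rw [hget'] at hv'
    split at hv'
    · cases hv'
      exact hnewcnt
    · exact le_trans (hInv.count _ _ _ hv') hmono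
  · -- source
    rw [pvMget_eq_mgetN, hget', if_neg hsn', ← pvMget_eq_mgetN]
    exact hInv.source
  · -- qmem
    intro c' hc'
    rcases List.mem_cons.mp hc' with rfl | hc'
    · exact ⟨hcinb, hsome _ _ (by rw [← pvMget_eq_mgetN] at hcurN ⊢; rw [hcur]; rfl)⟩
    · rcases List.mem_append.mp hc' with hc' | hc'
      · have := hInv.qmem c' (List.mem_cons_of_mem _ hc')
        exact ⟨this.1, hsome _ _ this.2⟩
      · rcases List.mem_singleton.mp hc' with rfl
        refine ⟨hninb, ?_⟩
        rw [pvMget_eq_mgetN, hget', if_pos ⟨rfl, rfl⟩]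
        rfl
  · -- relax
    intro c' hinb' hnotin v' hv' d' hd' hvalid'
    have hne' : c' ≠ n := by
      intro hh; exact hnotin (by rw [hh]; exact List.mem_cons_of_mem _ (List.mem_append_right _ (List.mem_singleton.mpr rfl)))
    have hnotin' : c' ∉ c :: q := by
      intro hh
      rcases List.mem_cons.mp hh with rfl | hh
      · exact hnotin List.mem_cons_self
      · exact hnotin (List.mem_cons_of_mem _ (List.mem_append_left _ hh))
    have hv'' : pvMget dist c'.1 c'.2 = some v' := by
      rw [pvMget_eq_mgetN] at hv' ⊢
      rw [hget', if_neg (inb_ne_toNat hinb' hninb hne')] at hv'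
      exact hv'
    obtain ⟨w, hw, hmw⟩ := hInv.relax c' hinb' hnotin' v' hv'' d' hd' hvalid'
    by_cases hmn : (c'.1 + d'.1, c'.2 + d'.2) = n
    · refine ⟨vu + 1, ?_, ?_⟩
      · have : vu + 1 < w := by
          apply hold
          rw [← pvMget_eq_mgetN, ← hmn]
          exact hmw
        omega
      · have hm1 : c'.1 + d'.1 = n.1 := by rw [← hmn]
        have hm2 : c'.2 + d'.2 = n.2 := by rw [← hmn]
        rw [pvMget_eq_mgetN, hget', if_pos ⟨by rw [hm1], by rw [hm2]⟩]
    · obtain ⟨w2, hw2⟩ : ∃ w2, pvMget (pvMset dist n.1 n.2 (some (vu + 1))) (c'.1 + d'.1) (c'.2 + d'.2) = some w2 ∧ w2 ≤ w := by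
        refine ⟨w, ?_, le_refl w⟩
        rw [pvMget_eq_mgetN, hget',
          if_neg (inb_ne_toNat (valid_inb hvalid') hninb hmn), ← pvMget_eq_mgetN]
        exact hmw
      exact ⟨w2, le_trans hw2.2 hw, hw2.1⟩
  · -- value at c unchanged
    rw [pvMget_eq_mgetN, hget', if_neg hcn, ← pvMget_eq_mgetN]
    exact hcur
  · -- measure
    have hmat := rowAgg_set (pvCap (grid.length * (grid.headD []).length)) dist
      n.1.toNat n.2.toNat (some (vu + 1)) hjlt hilt
    rw [← pvMset_def] at hmat
    have hb : vu + 2 ≤ grid.length * (grid.headD []).length := le_trans hnewcnt hK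
    have hcapv : pvCap (grid.length * (grid.headD []).length) (some (vu + 1)) = vu + 1 := by
      show min (vu + 1) _ = vu + 1
      omega
    show rowAgg (pvCap (grid.length * (grid.headD []).length)) _ + 1 ≤
      rowAgg (pvCap (grid.length * (grid.headD []).length)) dist
    cases hov : mgetN dist n.1.toNat n.2.toNat with
    | none =>
      rw [hov] at hmat
      have hcapn : pvCap (grid.length * (grid.headD []).length) none =
          grid.length * (grid.headD []).length := rfl
      rw [hcapn, hcapv] at hmat
      omega
    | some o =>
      have ho := hold o hov
      rw [hov] at hmat
      have hcapo : pvCap (grid.length * (grid.headD []).length) (some o) =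
          min o (grid.length * (grid.headD []).length) := rfl
      rw [hcapo, hcapv] at hmat
      omega
  · -- pointwise decrease
    intro a b w hw
    rw [hget']
    split
    · rename_i hab
      refine ⟨vu + 1, rfl, ?_⟩
      have : vu + 1 < w := by
        apply hold
        rw [← hab.1, ← hab.2]
        exact hw
      omega
    · exact ⟨w, hw, le_refl w⟩

theorem pvLt_succ_false {a : Nat} {o : Option Nat}
    (h : pvLt (some (a + 1)) o = false) : ∃ w, o = some w ∧ w ≤ a + 1 := by
  cases o with
  | none => simp [pvLt] at h
  | some b =>
    refine ⟨b, rfl, ?_⟩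
    simpa [pvLt] using h

theorem fold_step {grid : List (List String)} {s c : Int × Int} {vu : Nat} :
    ∀ (ds : List (Int × Int)), (∀ d ∈ ds, d ∈ pvDirs) →
    ∀ (dist : List (List (Option Nat))) (q : List (Int × Int)),
    AInv grid s dist (c :: q) → pvMget dist c.1 c.2 = some vu →
    AInv grid s (ds.foldl (fun st d =>
        if valid_move grid (c.1 + d.1) (c.2 + d.2) &&
            pvLt (pvSucc (pvMget st.1 c.1 c.2)) (pvMget st.1 (c.1 + d.1) (c.2 + d.2))
        then (pvMset st.1 (c.1 + d.1) (c.2 + d.2) (pvSucc (pvMget st.1 c.1 c.2)),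
              st.2 ++ [(c.1 + d.1, c.2 + d.2)])
        else st) (dist, q)).1
      (c :: (ds.foldl (fun st d =>
        if valid_move grid (c.1 + d.1) (c.2 + d.2) &&
            pvLt (pvSucc (pvMget st.1 c.1 c.2)) (pvMget st.1 (c.1 + d.1) (c.2 + d.2))
        then (pvMset st.1 (c.1 + d.1) (c.2 + d.2) (pvSucc (pvMget st.1 c.1 c.2)),
              st.2 ++ [(c.1 + d.1, c.2 + d.2)])
        else st) (dist, q)).2) ∧
    pvMget (ds.foldl (fun st d =>
        if valid_move grid (c.1 + d.1) (c.2 + d.2) &&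
            pvLt (pvSucc (pvMget st.1 c.1 c.2)) (pvMget st.1 (c.1 + d.1) (c.2 + d.2))
        then (pvMset st.1 (c.1 + d.1) (c.2 + d.2) (pvSucc (pvMget st.1 c.1 c.2)),
              st.2 ++ [(c.1 + d.1, c.2 + d.2)])
        else st) (dist, q)).1 c.1 c.2 = some vu ∧
    (∀ d ∈ ds, valid_move grid (c.1 + d.1) (c.2 + d.2) = true →
      ∃ w, w ≤ vu + 1 ∧ pvMget (ds.foldl (fun st d =>
        if valid_move grid (c.1 + d.1) (c.2 + d.2) &&
            pvLt (pvSucc (pvMget st.1 c.1 c.2)) (pvMget st.1 (c.1 + d.1) (c.2 + d.2))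
        then (pvMset st.1 (c.1 + d.1) (c.2 + d.2) (pvSucc (pvMget st.1 c.1 c.2)),
              st.2 ++ [(c.1 + d.1, c.2 + d.2)])
        else st) (dist, q)).1 (c.1 + d.1) (c.2 + d.2) = some w) ∧
    matSum (grid.length * (grid.headD []).length) (ds.foldl (fun st d =>
        if valid_move grid (c.1 + d.1) (c.2 + d.2) &&
            pvLt (pvSucc (pvMget st.1 c.1 c.2)) (pvMget st.1 (c.1 + d.1) (c.2 + d.2))
        then (pvMset st.1 (c.1 + d.1) (c.2 + d.2) (pvSucc (pvMget st.1 c.1 c.2)),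
              st.2 ++ [(c.1 + d.1, c.2 + d.2)])
        else st) (dist, q)).1 + (ds.foldl (fun st d =>
        if valid_move grid (c.1 + d.1) (c.2 + d.2) &&
            pvLt (pvSucc (pvMget st.1 c.1 c.2)) (pvMget st.1 (c.1 + d.1) (c.2 + d.2))
        then (pvMset st.1 (c.1 + d.1) (c.2 + d.2) (pvSucc (pvMget st.1 c.1 c.2)),
              st.2 ++ [(c.1 + d.1, c.2 + d.2)])
        else st) (dist, q)).2.length
      ≤ matSum (grid.length * (grid.headD []).length) dist + q.length ∧
    (∀ a b : Nat, ∀ w, mgetN dist a b = some w →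
      ∃ w', mgetN (ds.foldl (fun st d =>
        if valid_move grid (c.1 + d.1) (c.2 + d.2) &&
            pvLt (pvSucc (pvMget st.1 c.1 c.2)) (pvMget st.1 (c.1 + d.1) (c.2 + d.2))
        then (pvMset st.1 (c.1 + d.1) (c.2 + d.2) (pvSucc (pvMget st.1 c.1 c.2)),
              st.2 ++ [(c.1 + d.1, c.2 + d.2)])
        else st) (dist, q)).1 a b = some w' ∧ w' ≤ w) := by
  intro ds
  induction ds with
  | nil =>
    intro _ dist q hInv hcur
    exact ⟨hInv, hcur, by simp, by simp, fun a b w hw => ⟨w, hw, le_refl w⟩⟩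
  | cons d0 ds ih =>
    intro hsub dist q hInv hcur
    have hd0 : d0 ∈ pvDirs := hsub d0 List.mem_cons_self
    have hsub' : ∀ d ∈ ds, d ∈ pvDirs := fun d hd => hsub d (List.mem_cons_of_mem _ hd)
    by_cases hcond : (valid_move grid (c.1 + d0.1) (c.2 + d0.2) &&
        pvLt (pvSucc (pvMget dist c.1 c.2)) (pvMget dist (c.1 + d0.1) (c.2 + d0.2))) = true
    · obtain ⟨hvalid, hguard⟩ := Bool.and_eq_true_iff.mp hcond
      have hguard' : pvLt (some (vu + 1)) (pvMget dist (c.1 + d0.1) (c.2 + d0.2)) = true := by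
        rw [hcur] at hguard
        exact hguard
      obtain ⟨hInv1, hcur1, hmeas1, hpt1⟩ := step_preserve (n := (c.1 + d0.1, c.2 + d0.2))
        hInv hcur ⟨d0, hd0, rfl⟩ hvalid hguard'
      have hF : (List.foldl (fun st d =>
          if valid_move grid (c.1 + d.1) (c.2 + d.2) &&
              pvLt (pvSucc (pvMget st.1 c.1 c.2)) (pvMget st.1 (c.1 + d.1) (c.2 + d.2))
          then (pvMset st.1 (c.1 + d.1) (c.2 + d.2) (pvSucc (pvMget st.1 c.1 c.2)),
                st.2 ++ [(c.1 + d.1, c.2 + d.2)])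
          else st) (dist, q) (d0 :: ds)) = (List.foldl (fun st d =>
          if valid_move grid (c.1 + d.1) (c.2 + d.2) &&
              pvLt (pvSucc (pvMget st.1 c.1 c.2)) (pvMget st.1 (c.1 + d.1) (c.2 + d.2))
          then (pvMset st.1 (c.1 + d.1) (c.2 + d.2) (pvSucc (pvMget st.1 c.1 c.2)),
                st.2 ++ [(c.1 + d.1, c.2 + d.2)])
          else st)
          (pvMset dist (c.1 + d0.1) (c.2 + d0.2) (some (vu + 1)), q ++ [(c.1 + d0.1, c.2 + d0.2)]) ds) := by
        rw [List.foldl_cons, if_pos hcond, hcur]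
        rfl
      rw [hF]
      obtain ⟨hA, hC, hP3, hM, hPt⟩ := ih hsub' _ _ hInv1 hcur1
      refine ⟨hA, hC, ?_, ?_, ?_⟩
      · intro d hd hvd
        rcases List.mem_cons.mp hd with rfl | hd
        · have hval1 : mgetN (pvMset dist (c.1 + d.1) (c.2 + d.2) (some (vu + 1)))
              (c.1 + d.1).toNat (c.2 + d.2).toNat = some (vu + 1) := by
            rw [mget_mset_inb hInv.shape_h hInv.shape_w (valid_inb hvalid) _ _ _]
            rw [if_pos ⟨rfl, rfl⟩]
          obtain ⟨w', hw', hle'⟩ := hPt _ _ _ hval1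
          exact ⟨w', hle', by rw [pvMget_eq_mgetN]; exact hw'⟩
        · exact hP3 d hd hvd
      · refine le_trans hM ?_
        rw [List.length_append, List.length_singleton]
        omega
      · intro a b w hw
        have hmid : mgetN (pvMset dist (c.1 + d0.1) (c.2 + d0.2) (some (vu + 1))) a b =
            if a = (c.1 + d0.1).toNat ∧ b = (c.2 + d0.2).toNat then some (vu + 1)
            else mgetN dist a b :=
          mget_mset_inb hInv.shape_h hInv.shape_w (valid_inb hvalid) _ a b
        obtain ⟨w1, hw1, hle1⟩ := hpt1 a b w hw
        obtain ⟨w2, hw2, hle2⟩ := hPt a b w1 hw1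
        exact ⟨w2, hw2, le_trans hle2 hle1⟩
    · have hF : (List.foldl (fun st d =>
          if valid_move grid (c.1 + d.1) (c.2 + d.2) &&
              pvLt (pvSucc (pvMget st.1 c.1 c.2)) (pvMget st.1 (c.1 + d.1) (c.2 + d.2))
          then (pvMset st.1 (c.1 + d.1) (c.2 + d.2) (pvSucc (pvMget st.1 c.1 c.2)),
                st.2 ++ [(c.1 + d.1, c.2 + d.2)])
          else st) (dist, q) (d0 :: ds)) = (List.foldl (fun st d =>
          if valid_move grid (c.1 + d.1) (c.2 + d.2) &&
              pvLt (pvSucc (pvMget st.1 c.1 c.2)) (pvMget st.1 (c.1 + d.1) (c.2 + d.2))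
          then (pvMset st.1 (c.1 + d.1) (c.2 + d.2) (pvSucc (pvMget st.1 c.1 c.2)),
                st.2 ++ [(c.1 + d.1, c.2 + d.2)])
          else st) (dist, q) ds) := by
        rw [List.foldl_cons, if_neg hcond]
      rw [hF]
      obtain ⟨hA, hC, hP3, hM, hPt⟩ := ih hsub' _ _ hInv hcur
      refine ⟨hA, hC, ?_, hM, hPt⟩
      intro d hd hvd
      rcases List.mem_cons.mp hd with rfl | hd
      · have hgf : pvLt (some (vu + 1)) (pvMget dist (c.1 + d.1) (c.2 + d.2)) = false := by
          rcases Bool.and_eq_false_iff.mp (by simpa using hcond) with h | h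
          · rw [hvd] at h; cases h
          · rw [hcur] at h
            exact h
        obtain ⟨w, hweq, hwle⟩ := pvLt_succ_false hgf
        obtain ⟨w', hw', hle'⟩ := hPt _ _ _ (by rw [← pvMget_eq_mgetN]; exact hweq)
        exact ⟨w', le_trans hle' hwle, by rw [pvMget_eq_mgetN]; exact hw'⟩
      · exact hP3 d hd hvd

theorem loop_post {grid : List (List String)} {s : Int × Int} :
    ∀ (fuel : Nat) (dist : List (List (Option Nat))) (q : List (Int × Int)),
    AInv grid s dist q →
    matSum (grid.length * (grid.headD []).length) dist + q.length < fuel →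
    AInv grid s (pvBfsLoop grid fuel dist q) [] := by
  intro fuel
  induction fuel with
  | zero => intro dist q _ hm; omega
  | succ fuel ih =>
    intro dist q hInv hm
    cases q with
    | nil => exact hInv
    | cons c q =>
      obtain ⟨hcinb, hsome⟩ := hInv.qmem c List.mem_cons_self
      obtain ⟨vu, hcur⟩ := Option.isSome_iff_exists.mp hsome
      obtain ⟨hA, hC, hP3, hM, _⟩ := fold_step (s := s) (vu := vu) pvDirs
        (fun d hd => hd) dist q hInv hcur
      show AInv grid s (pvBfsLoop grid (fuel + 1) dist (c :: q)) []
      rw [show pvBfsLoop grid (fuel + 1) dist (c :: q) = pvBfsLoop grid fuel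
        (List.foldl (fun st d =>
          if valid_move grid (c.1 + d.1) (c.2 + d.2) &&
              pvLt (pvSucc (pvMget st.1 c.1 c.2)) (pvMget st.1 (c.1 + d.1) (c.2 + d.2))
          then (pvMset st.1 (c.1 + d.1) (c.2 + d.2) (pvSucc (pvMget st.1 c.1 c.2)),
                st.2 ++ [(c.1 + d.1, c.2 + d.2)])
          else st) (dist, q) pvDirs).1
        (List.foldl (fun st d =>
          if valid_move grid (c.1 + d.1) (c.2 + d.2) &&
              pvLt (pvSucc (pvMget st.1 c.1 c.2)) (pvMget st.1 (c.1 + d.1) (c.2 + d.2))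
          then (pvMset st.1 (c.1 + d.1) (c.2 + d.2) (pvSucc (pvMget st.1 c.1 c.2)),
                st.2 ++ [(c.1 + d.1, c.2 + d.2)])
          else st) (dist, q) pvDirs).2 from rfl]
      apply ih
      · refine ⟨hA.sInb, hA.shape_h, hA.shape_w, hA.achieve, hA.count, hA.source,
          fun c' hc' => hA.qmem c' (List.mem_cons_of_mem _ hc'), ?_⟩
        intro c' hinb' hnotin v hv d' hd' hvd'
        by_cases hcc : c' = c
        · subst hcc
          have hveq : v = vu := by
            rw [hC] at hv
            cases hv
            rfl
          subst hveq
          obtain ⟨w, hwle, hweq⟩ := hP3 d' hd' hvd'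
          exact ⟨w, hwle, hweq⟩
        · exact hA.relax c' hinb' (by
            intro hmem
            rcases List.mem_cons.mp hmem with h | h
            · exact hcc h
            · exact hnotin h) v hv d' hd' hvd'
      · simp only [List.length_cons] at hm
        omega

theorem mgetN_replicate (H W i j : Nat) :
    mgetN (List.replicate H (List.replicate W (none : Option Nat))) i j = none := by
  unfold mgetN
  rw [List.getD_eq_getElem?_getD (l := List.replicate H (List.replicate W none)),
    List.getElem?_replicate]
  split
  · show (List.replicate W (none : Option Nat)).getD i none = none
    rw [List.getD_eq_getElem?_getD, List.getElem?_replicate]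
    split <;> rfl
  · rfl

theorem rowAgg_replicate (g : Option Nat → Nat) (H W : Nat) :
    rowAgg g (List.replicate H (List.replicate W (none : Option Nat))) =
      H * (W * g none) := by
  unfold rowAgg
  simp [List.map_replicate, List.sum_replicate, smul_eq_mul]

theorem reach_all_false {grid : List (List String)} {s : Int × Int}
    (hs : valid_move grid s.1 s.2 = false) : ∀ j c, reachF grid s j c = false := by
  intro j
  induction j with
  | zero =>
    intro c
    show (c == s && valid_move grid s.1 s.2) = false
    rw [hs, Bool.and_false]
  | succ j ih =>
    intro c
    rw [reach_succ_eq, ih c]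
    cases hv : valid_move grid c.1 c.2
    · rfl
    · have : (pvDirs.any fun d => reachF grid s j (c.1 - d.1, c.2 - d.2)) = false := by
        rw [List.any_eq_false]
        intro d _
        simp [ih]
      rw [this, Bool.and_false, Bool.or_false]

theorem bfs_eq (grid : List (List String)) (start : Int × Int) :
    bfs_distance_map grid start =
      if valid_move grid start.1 start.2 = true then
        pvBfsLoop grid (grid.length * (grid.headD []).length *
            (grid.length * (grid.headD []).length) + 2)
          (pvMset (List.replicate grid.length
              (List.replicate (grid.headD []).length none)) start.1 start.2 (some 0))
          [start]
      else List.replicate grid.length (List.replicate (grid.headD []).length none) := by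
  unfold bfs_distance_map valid_move
  cases hin : in_bounds start.1 start.2 grid <;>
    cases hcell : (pvCell grid start.1 start.2 == ".") <;>
    simp [hin, hcell]

theorem complete {grid : List (List String)} {s : Int × Int}
    {dist : List (List (Option Nat))} (hInv : AInv grid s dist []) :
    ∀ (j : Nat) (c : Int × Int), reachF grid s j c = true →
      ∃ v, v ≤ j ∧ pvMget dist c.1 c.2 = some v := by
  intro j
  induction j with
  | zero =>
    intro c hc
    obtain ⟨rfl, _⟩ := reach_zero_iff.mp hc
    exact ⟨0, le_refl 0, hInv.source⟩
  | succ j ih =>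
    intro c hc
    rw [reach_succ_eq] at hc
    rcases Bool.or_eq_true_iff.mp hc with h | h
    · obtain ⟨v, hv, hg⟩ := ih c h
      exact ⟨v, by omega, hg⟩
    · obtain ⟨hvalid, hany⟩ := Bool.and_eq_true_iff.mp h
      obtain ⟨d, hd, hu⟩ := List.any_eq_true.mp hany
      obtain ⟨vu, hvu, hgu⟩ := ih _ hu
      have huinb : pvInb grid ((c.1 - d.1, c.2 - d.2) : Int × Int) :=
        valid_inb (reach_open hu)
      have hvn : valid_move grid ((c.1 - d.1) + d.1) ((c.2 - d.2) + d.2) = true := by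
        rw [show (c.1 - d.1) + d.1 = c.1 by ring, show (c.2 - d.2) + d.2 = c.2 by ring]
        exact hvalid
      obtain ⟨w, hw, hmw⟩ := hInv.relax _ huinb (List.not_mem_nil) vu hgu d hd hvn
      refine ⟨w, by omega, ?_⟩
      rw [show c.1 = (c.1 - d.1) + d.1 by ring, show c.2 = (c.2 - d.2) + d.2 by ring]
      exact hmw

theorem bfs_post {grid : List (List String)} {s : Int × Int}
    (hs : valid_move grid s.1 s.2 = true) :
    AInv grid s (bfs_distance_map grid s) [] := by
  rw [bfs_eq, if_pos hs]
  have hsinb : pvInb grid s := valid_inb hs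
  have hh0 : (List.replicate grid.length
      (List.replicate (grid.headD []).length (none : Option Nat))).length = grid.length := by
    simp
  have hw0 : ∀ row ∈ List.replicate grid.length
      (List.replicate (grid.headD []).length (none : Option Nat)),
      row.length = (grid.headD []).length := by
    intro row hrow
    rw [List.eq_of_mem_replicate hrow]
    simp
  have hget1 := mget_mset_inb hh0 hw0 hsinb (some 0)
  have hfin := rowAgg_set (fun e => if e.isSome then 1 else 0)
    (List.replicate grid.length (List.replicate (grid.headD []).length none))
    s.1.toNat s.2.toNat (some 0)
    (by rw [hh0]; exact (inb_toNat_lt hsinb).2)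
    (by rw [row_len hh0 hw0 (inb_toNat_lt hsinb).2]; exact (inb_toNat_lt hsinb).1)
  rw [← pvMset_def, mgetN_replicate, rowAgg_replicate] at hfin
  have hg0 : (fun e : Option Nat => if e.isSome then 1 else 0) none = 0 := rfl
  have hg1 : (fun e : Option Nat => if e.isSome then 1 else 0) (some 0) = 1 := rfl
  rw [hg0, hg1] at hfin
  have hgn : (if (none : Option Nat).isSome = true then 1 else 0) = 0 := rfl
  rw [hgn, Nat.mul_zero, Nat.mul_zero] at hfin
  have hmat := rowAgg_set (pvCap (grid.length * (grid.headD []).length))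
    (List.replicate grid.length (List.replicate (grid.headD []).length none))
    s.1.toNat s.2.toNat (some 0)
    (by rw [hh0]; exact (inb_toNat_lt hsinb).2)
    (by rw [row_len hh0 hw0 (inb_toNat_lt hsinb).2]; exact (inb_toNat_lt hsinb).1)
  rw [← pvMset_def, mgetN_replicate, rowAgg_replicate] at hmat
  apply loop_post
  · refine ⟨hsinb, ?_, ?_, ?_, ?_, ?_, ?_, ?_⟩
    · rw [pvMset_def, List.length_set]; exact hh0
    · intro row hrow
      rw [pvMset_def] at hrow
      rcases List.mem_or_eq_of_mem_set hrow with h | h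
      · exact hw0 _ h
      · subst h
        rw [List.length_set]
        exact row_len hh0 hw0 (inb_toNat_lt hsinb).2
    · intro i j v hv
      rw [hget1] at hv
      split at hv
      · rename_i hij
        cases hv
        rw [show ((i : Int), (j : Int)) = s by rw [hij.1, hij.2]; exact inb_cast hsinb]
        rw [reach_zero_iff]
        exact ⟨rfl, hs⟩
      · rw [mgetN_replicate] at hv; cases hv
    · intro i j v hv
      rw [hget1] at hv
      split at hv
      · cases hv
        unfold finCount
        omega
      · rw [mgetN_replicate] at hv; cases hv
    · rw [pvMget_eq_mgetN, hget1, if_pos ⟨rfl, rfl⟩]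
    · intro c hc
      rcases List.mem_singleton.mp hc with rfl
      refine ⟨hsinb, ?_⟩
      rw [pvMget_eq_mgetN, hget1, if_pos ⟨rfl, rfl⟩]
      rfl
    · intro c' hinb' hnotin v hv d hd hvd
      exfalso
      rw [pvMget_eq_mgetN, hget1] at hv
      split at hv
      · rename_i hij
        have : c' = s := by
          rw [← inb_cast hinb', ← inb_cast hsinb, hij.1, hij.2]
        exact hnotin (by rw [this]; exact List.mem_singleton.mpr rfl)
      · rw [mgetN_replicate] at hv; cases hv
  · show matSum _ _ + 1 < _
    unfold matSum
    have hcap0 : pvCap (grid.length * (grid.headD []).length) (some 0) = 0 := by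
      show min 0 _ = 0
      omega
    have hcapn : pvCap (grid.length * (grid.headD []).length) none =
        grid.length * (grid.headD []).length := rfl
    rw [hcap0, hcapn] at hmat
    have hKK : grid.length * ((grid.headD []).length *
        (grid.length * (grid.headD []).length)) =
        (grid.length * (grid.headD []).length) * (grid.length * (grid.headD []).length) := by
      ring
    rw [hKK] at hmat
    have hWpos : 0 < grid.length * (grid.headD []).length := by
      obtain ⟨h1, h2, h3, h4⟩ := hsinb
      unfold pvW at h2
      have : 0 < (grid.headD []).length := by omega
      have : 0 < grid.length := by omega
      positivity
    omega

-- the final characterisation of A's distance map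
theorem bfs_some_least {grid : List (List String)} {s c : Int × Int} {v : Nat}
    (h : pvMget (bfs_distance_map grid s) c.1 c.2 = some v) (hc : pvInb grid c) :
    reachF grid s v c = true ∧ (∀ j, reachF grid s j c = true → v ≤ j) ∧
      v + 1 ≤ grid.length * (grid.headD []).length := by
  by_cases hs : valid_move grid s.1 s.2 = true
  · have hpost := bfs_post (grid := grid) hs
    refine ⟨?_, ?_, ?_⟩
    · have := hpost.achieve c.1.toNat c.2.toNat v (by rw [← pvMget_eq_mgetN]; exact h)
      rwa [inb_cast hc] at this
    · intro j hj
      obtain ⟨w, hwj, hw⟩ := complete hpost j c hj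
      rw [h] at hw
      cases hw
      omega
    · exact le_trans (hpost.count c.1.toNat c.2.toNat v
        (by rw [← pvMget_eq_mgetN]; exact h)) (finCount_le hpost.shape_h hpost.shape_w)
  · exfalso
    rw [bfs_eq, if_neg hs, pvMget_eq_mgetN, mgetN_replicate] at h
    cases h

theorem bfs_none {grid : List (List String)} {s c : Int × Int}
    (h : pvMget (bfs_distance_map grid s) c.1 c.2 = none) (hc : pvInb grid c) :
    ∀ j, reachF grid s j c = false := by
  intro j
  by_cases hs : valid_move grid s.1 s.2 = true
  · cases hj : reachF grid s j c
    · rfl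
    · obtain ⟨w, _, hw⟩ := complete (bfs_post (grid := grid) hs) j c hj
      rw [h] at hw
      cases hw
  · exact reach_all_false (by simpa using hs) j c


theorem pvNbrs_eq_map (c : Int × Int) :
    pvNbrs c = pvDirs.map (fun d => (c.1 + d.1, c.2 + d.2)) := by
  simp [pvNbrs, pvDirs]
  constructor <;> omega

theorem pvOpenB_eq (grid : List (List String)) (c : Int × Int) :
    pvOpenB grid c = valid_move grid c.1 c.2 := rfl

theorem mem_foldl_add_if {α : Type} [BEq α] [LawfulBEq α] (p : α → Bool) (l : List α)
    (s : PySem.Set α) (y : α) :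
    (y ∈ l.foldl (fun s n => if p n then PySem.Set.add s n else s) s) ↔
      y ∈ s ∨ (y ∈ l ∧ p y = true) := by
  induction l generalizing s with
  | nil => simp
  | cons a l ih =>
    simp only [List.foldl_cons, ih]
    by_cases ha : p a = true
    · rw [if_pos ha]
      constructor
      · rintro (h | h)
        · rcases (PySem.Set.mem_add _ _ _).mp h with h' | h'
          · exact Or.inl h'
          · subst h'; exact Or.inr ⟨List.mem_cons_self, ha⟩
        · exact Or.inr ⟨List.mem_cons_of_mem _ h.1, h.2⟩
      · rintro (h | ⟨h1, h2⟩)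
        · exact Or.inl ((PySem.Set.mem_add _ _ _).mpr (Or.inl h))
        · rcases List.mem_cons.mp h1 with h' | h'
          · subst h'; exact Or.inl ((PySem.Set.mem_add _ _ _).mpr (Or.inr rfl))
          · exact Or.inr ⟨h', h2⟩
    · rw [if_neg (by simp [ha])]
      constructor
      · rintro (h | h)
        · exact Or.inl h
        · exact Or.inr ⟨List.mem_cons_of_mem _ h.1, h.2⟩
      · rintro (h | ⟨h1, h2⟩)
        · exact Or.inl h
        · rcases List.mem_cons.mp h1 with h' | h'
          · subst h'; exact absurd h2 (by simp [ha])
          · exact Or.inr ⟨h', h2⟩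

theorem nodup_foldl_add_if {α : Type} [BEq α] [LawfulBEq α] (p : α → Bool) (l : List α)
    (s : PySem.Set α) (hs : s.Nodup) :
    (l.foldl (fun s n => if p n then PySem.Set.add s n else s) s).Nodup := by
  induction l generalizing s with
  | nil => exact hs
  | cons a l ih =>
    simp only [List.foldl_cons]
    by_cases ha : p a = true
    · rw [if_pos ha]
      exact ih _ (PySem.Set.nodup_add _ _ hs)
    · rw [if_neg (by simp [ha])]
      exact ih _ hs

theorem mem_grow {grid : List (List String)} (front : List (Int × Int))
    (s : PySem.Set (Int × Int)) (y : Int × Int) :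
    (y ∈ front.foldl (fun s c =>
        (pvNbrs c).foldl (fun s n => if pvOpenB grid n then PySem.Set.add s n else s) s) s) ↔
      y ∈ s ∨ ∃ u ∈ front, y ∈ pvNbrs u ∧ pvOpenB grid y = true := by
  induction front generalizing s with
  | nil => simp
  | cons a l ih =>
    simp only [List.foldl_cons, ih, mem_foldl_add_if]
    constructor
    · rintro (⟨h | ⟨h1, h2⟩⟩ | ⟨u, hu, h1, h2⟩)
      · exact Or.inl h
      · exact Or.inr ⟨a, List.mem_cons_self, h1, h2⟩
      · exact Or.inr ⟨u, List.mem_cons_of_mem _ hu, h1, h2⟩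
    · rintro (h | ⟨u, hu, h1, h2⟩)
      · exact Or.inl (Or.inl h)
      · rcases List.mem_cons.mp hu with h' | h'
        · subst h'; exact Or.inl (Or.inr ⟨h1, h2⟩)
        · exact Or.inr ⟨u, h', h1, h2⟩

theorem nodup_grow {grid : List (List String)} (front : List (Int × Int))
    (s : PySem.Set (Int × Int)) (hs : s.Nodup) :
    (front.foldl (fun s c =>
        (pvNbrs c).foldl (fun s n => if pvOpenB grid n then PySem.Set.add s n else s) s) s).Nodup := by
  induction front generalizing s with
  | nil => exact hs
  | cons a l ih => exact ih _ (nodup_foldl_add_if _ _ _ hs)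

theorem mem_ring {grid : List (List String)} {front seen : PySem.Set (Int × Int)}
    {y : Int × Int} :
    y ∈ pvRing grid front seen ↔
      ((∃ u ∈ front, y ∈ pvNbrs u ∧ pvOpenB grid y = true) ∧ y ∉ seen) := by
  unfold pvRing
  rw [PySem.Set.mem_diff _ _ _, mem_grow]
  simp [PySem.Set.empty]

theorem nodup_ring (grid : List (List String)) (front seen : PySem.Set (Int × Int)) :
    (pvRing grid front seen).Nodup :=
  PySem.Set.nodup_diff _ _ (nodup_grow _ _ (by simp [PySem.Set.empty]))

-- ---- B-side ----
def newAt (grid : List (List String)) (s : Int × Int) (r : Nat) (c : Int × Int) : Prop :=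
  match r with
  | 0 => reachF grid s 0 c = true
  | r + 1 => reachF grid s (r + 1) c = true ∧ reachF grid s r c = false

structure BInv (grid : List (List String)) (mh oh : Int × Int) (r : Nat) (st : PvSt) : Prop where
  fr_nd : st.fr.Nodup
  fb_nd : st.fb.Nodup
  sr_nd : st.sr.Nodup
  sb_nd : st.sb.Nodup
  fr_mem : ∀ c, c ∈ st.fr ↔ newAt grid mh r c
  fb_mem : ∀ c, c ∈ st.fb ↔ newAt grid oh r c
  sr_mem : ∀ c, c ∈ st.sr ↔ reachF grid mh r c = true
  sb_mem : ∀ c, c ∈ st.sb ↔ reachF grid oh r c = true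
  ow_get : ∀ c, PySem.Dict.get? st.ow c = expOwner grid mh oh r c

theorem reach_false_le {grid : List (List String)} {s : Int × Int} {i r : Nat} {c : Int × Int}
    (h : reachF grid s r c = false) (hi : i ≤ r) : reachF grid s i c = false := by
  cases h' : reachF grid s i c
  · rfl
  · exact absurd (reach_mono hi h') (by simp [h])

theorem newAt_reach {grid : List (List String)} {s : Int × Int} {r : Nat} {c : Int × Int}
    (h : newAt grid s r c) : reachF grid s r c = true := by
  cases r with
  | zero => exact h
  | succ r => exact h.1

theorem fstR_succ_eq (grid : List (List String)) (s : Int × Int) (r : Nat) (c : Int × Int) :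
    fstR grid s (r + 1) c = (match fstR grid s r c with
      | some j => some j
      | none => if reachF grid s (r + 1) c = true then some (r + 1) else none) := rfl

theorem fstR_none_iff {grid : List (List String)} {s : Int × Int} {r : Nat} {c : Int × Int} :
    fstR grid s r c = none ↔ reachF grid s r c = false := by
  induction r with
  | zero =>
    unfold fstR; split <;> simp_all
  | succ r ih =>
    unfold fstR
    cases hf : fstR grid s r c with
    | some j =>
      have : reachF grid s r c = true := by
        by_contra hcon
        have := ih.mpr (by simpa using hcon)
        simp [this] at hf
      simp [reach_mono (Nat.le_succ r) this]
    | none => split <;> simp_all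

theorem fstR_some_spec {grid : List (List String)} {s : Int × Int} {r j : Nat} {c : Int × Int}
    (h : fstR grid s r c = some j) :
    j ≤ r ∧ reachF grid s j c = true ∧ ∀ i, i < j → reachF grid s i c = false := by
  induction r with
  | zero =>
    unfold fstR at h
    split at h
    · rename_i hr
      cases h
      exact ⟨Nat.le_refl 0, hr, fun i hi => absurd hi (by omega)⟩
    · cases h
  | succ r ih =>
    rw [fstR_succ_eq] at h
    cases hf : fstR grid s r c with
    | some j' =>
      rw [hf] at h
      have h' : some j' = some j := h
      cases h'
      have := ih hf
      exact ⟨Nat.le_succ_of_le this.1, this.2⟩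
    | none =>
      rw [hf] at h
      have h' : (if reachF grid s (r + 1) c = true then some (r + 1) else none) = some j := h
      split at h'
      · rename_i hr
        cases h'
        refine ⟨Nat.le_refl _, hr, fun i hi => ?_⟩
        exact reach_false_le (fstR_none_iff.mp hf) (by omega)
      · cases h' 

theorem fstR_new {grid : List (List String)} {s : Int × Int} {r : Nat} {c : Int × Int}
    (h : newAt grid s (r + 1) c) : fstR grid s (r + 1) c = some (r + 1) := by
  rw [fstR_succ_eq, fstR_none_iff.mpr h.2]
  simp [h.1]

theorem fstR_not_new {grid : List (List String)} {s : Int × Int} {r : Nat} {c : Int × Int}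
    (h : ¬ newAt grid s (r + 1) c) : fstR grid s (r + 1) c = fstR grid s r c := by
  rw [fstR_succ_eq]
  cases hf : fstR grid s r c with
  | some j => rfl
  | none =>
    have h2 : reachF grid s r c = false := fstR_none_iff.mp hf
    have h1 : reachF grid s (r + 1) c = false := by
      cases h' : reachF grid s (r + 1) c
      · rfl
      · exact absurd ⟨h', h2⟩ h
    simp [h1]

theorem fstR_least {grid : List (List String)} {s : Int × Int} {v r : Nat} {c : Int × Int}
    (hv : reachF grid s v c = true) (hleast : ∀ j, reachF grid s j c = true → v ≤ j)
    (hr : v ≤ r) : fstR grid s r c = some v := by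
  induction r with
  | zero =>
    have : v = 0 := by omega
    subst this
    unfold fstR; simp [hv]
  | succ r ih =>
    by_cases hvr : v ≤ r
    · have hnot : ¬ newAt grid s (r + 1) c := fun hne =>
        absurd (reach_mono hvr hv) (by simp [hne.2])
      rw [fstR_not_new hnot]
      exact ih hvr
    · have hveq : v = r + 1 := by omega
      subst hveq
      have hrf : reachF grid s r c = false := by
        cases h' : reachF grid s r c
        · rfl
        · exact absurd (hleast _ h') (by omega)
      exact fstR_new ⟨hv, hrf⟩

theorem get?_foldl_insert_if (p : (Int × Int) → Bool) (v : Int) (l : List (Int × Int))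
    (ow : PySem.Dict (Int × Int) Int) (y : Int × Int) :
    (l.foldl (fun ow c => if p c then PySem.Dict.insert ow c v else ow) ow).get? y =
      if y ∈ l ∧ p y = true then some v else ow.get? y := by
  induction l generalizing ow with
  | nil => simp
  | cons a l ih =>
    simp only [List.foldl_cons, ih]
    by_cases hmem : y ∈ l ∧ p y = true
    · rw [if_pos hmem, if_pos ⟨List.mem_cons_of_mem _ hmem.1, hmem.2⟩]
    · rw [if_neg hmem]
      by_cases hya : y = a
      · subst hya
        by_cases hp : p y = true
        · rw [if_pos hp, PySem.Dict.get?_insert, if_pos rfl,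
            if_pos ⟨List.mem_cons_self, hp⟩]
        · rw [if_neg (by simpa using hp), if_neg (by rintro ⟨_, h2⟩; exact hp h2)]
      · have hstep : (if p a = true then (ow.insert a v) else ow).get? y = ow.get? y := by
          split
          · rw [PySem.Dict.get?_insert, if_neg hya]
          · rfl
        have hcond : ¬ (y ∈ a :: l ∧ p y = true) := by
          rintro ⟨h1, h2⟩
          rcases List.mem_cons.mp h1 with h' | h'
          · exact hya h'
          · exact hmem ⟨h', h2⟩
        rw [hstep, if_neg hcond]

theorem frontier_step {grid : List (List String)} {s : Int × Int} {r : Nat} {c : Int × Int} :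
    ((∃ u, newAt grid s r u ∧ c ∈ pvNbrs u ∧ valid_move grid c.1 c.2 = true) ∧
      reachF grid s r c = false) ↔ newAt grid s (r + 1) c := by
  constructor
  · rintro ⟨⟨u, hu, hadj, hopen⟩, hnr⟩
    refine ⟨?_, hnr⟩
    rw [reach_succ_eq]
    rw [pvNbrs_eq_map] at hadj
    rcases List.mem_map.mp hadj with ⟨d, hd, hc⟩
    have hcd : (c.1 - d.1, c.2 - d.2) = u := by
      rw [← hc]; simp
    simp only [Bool.or_eq_true, Bool.and_eq_true, List.any_eq_true]
    exact Or.inr ⟨hopen, d, hd, by rw [hcd]; exact newAt_reach hu⟩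
  · rintro ⟨h1, h2⟩
    refine ⟨?_, h2⟩
    rw [reach_succ_eq, h2] at h1
    simp only [Bool.false_or, Bool.and_eq_true, List.any_eq_true] at h1
    obtain ⟨hvalid, d, hd, hru⟩ := h1
    refine ⟨(c.1 - d.1, c.2 - d.2), ?_, ?_, hvalid⟩
    · cases r with
      | zero => exact hru
      | succ r' =>
        refine ⟨hru, ?_⟩
        by_contra hcon
        have hru' : reachF grid s r' (c.1 - d.1, c.2 - d.2) = true := by
          cases h' : reachF grid s r' (c.1 - d.1, c.2 - d.2)
          · exact absurd h' (by simpa using hcon)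
          · rfl
        have hrc : reachF grid s (r' + 1) c = true := by
          rw [reach_succ_eq]
          simp only [Bool.or_eq_true, Bool.and_eq_true, List.any_eq_true]
          exact Or.inr ⟨hvalid, d, hd, hru'⟩
        simp [hrc] at h2
    · rw [pvNbrs_eq_map]
      exact List.mem_map.mpr ⟨d, hd, by simp⟩

theorem reach_succ_iff {grid : List (List String)} {s : Int × Int} {r : Nat} {c : Int × Int} :
    reachF grid s (r + 1) c = true ↔ reachF grid s r c = true ∨ newAt grid s (r + 1) c := by
  constructor
  · intro h1
    by_cases hr : reachF grid s r c = true
    · exact Or.inl hr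
    · exact Or.inr ⟨h1, by simpa using hr⟩
  · rintro (h1 | h1)
    · exact reach_succ h1
    · exact h1.1

theorem ring_mem_newAt {grid : List (List String)} {s : Int × Int} {r : Nat}
    {front seen : PySem.Set (Int × Int)}
    (hf : ∀ c, c ∈ front ↔ newAt grid s r c)
    (hs : ∀ c, c ∈ seen ↔ reachF grid s r c = true) (c : Int × Int) :
    c ∈ pvRing grid front seen ↔ newAt grid s (r + 1) c := by
  rw [mem_ring, ← frontier_step (s := s) (r := r) (c := c)]
  constructor
  · rintro ⟨⟨u, hu, h1, h2⟩, h3⟩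
    refine ⟨⟨u, (hf u).mp hu, h1, by rwa [pvOpenB_eq] at h2⟩, ?_⟩
    cases hrc : reachF grid s r c
    · rfl
    · exact absurd ((hs c).mpr hrc) h3
  · rintro ⟨⟨u, hu, h1, h2⟩, h3⟩
    exact ⟨⟨u, (hf u).mpr hu, h1, by rwa [pvOpenB_eq]⟩,
      fun hmem => by simp [(hs c).mp hmem] at h3⟩

theorem pv_contains_true {α : Type} [BEq α] [LawfulBEq α] {s : PySem.Set α} {x : α}
    (h : x ∈ s) : PySem.Set.contains s x = true := by
  simpa using h

theorem pv_contains_false {α : Type} [BEq α] [LawfulBEq α] {s : PySem.Set α} {x : α}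
    (h : x ∉ s) : PySem.Set.contains s x = false := by
  simpa using h

theorem bInv_round {grid : List (List String)} {mh oh : Int × Int} {r : Nat} {st : PvSt}
    (h : BInv grid mh oh r st) : BInv grid mh oh (r + 1) (pvRound grid st) := by
  have hNR : ∀ c, c ∈ pvRing grid st.fr st.sr ↔ newAt grid mh (r + 1) c :=
    ring_mem_newAt h.fr_mem h.sr_mem
  have hNB : ∀ c, c ∈ pvRing grid st.fb st.sb ↔ newAt grid oh (r + 1) c :=
    ring_mem_newAt h.fb_mem h.sb_mem
  refine ⟨nodup_ring _ _ _, nodup_ring _ _ _,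
    PySem.Set.nodup_union _ _ h.sr_nd, PySem.Set.nodup_union _ _ h.sb_nd,
    hNR, hNB, ?_, ?_, ?_⟩
  · intro c
    show c ∈ PySem.Set.union st.sr (pvRing grid st.fr st.sr) ↔ _
    rw [PySem.Set.mem_union _ _ _]
    rw [reach_succ_iff (s := mh)]
    exact or_congr (h.sr_mem c) (hNR c)
  · intro c
    show c ∈ PySem.Set.union st.sb (pvRing grid st.fb st.sb) ↔ _
    rw [PySem.Set.mem_union _ _ _]
    rw [reach_succ_iff (s := oh)]
    exact or_congr (h.sb_mem c) (hNB c)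
  · intro c
    show ((pvRing grid st.fb st.sb).foldl _
        ((pvRing grid st.fr st.sr).foldl _ st.ow)).get? c = _
    rw [get?_foldl_insert_if, get?_foldl_insert_if, h.ow_get c]
    by_cases hR : c ∈ pvRing grid st.fr st.sr <;>
      by_cases hB : c ∈ pvRing grid st.fb st.sb
    · -- reached by both this round: tie, nothing inserted
      have hnR := (hNR c).mp hR
      have hnB := (hNB c).mp hB
      rw [if_neg (by rintro ⟨_, hp⟩; rw [pv_contains_true hR] at hp; simp at hp),
        if_neg (by rintro ⟨_, hp⟩; rw [pv_contains_true hB] at hp; simp at hp)]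
      unfold expOwner
      rw [fstR_none_iff.mpr hnR.2, fstR_none_iff.mpr hnB.2, fstR_new hnR, fstR_new hnB]
      simp
    · -- red reaches c this round, blue does not
      have hnR := (hNR c).mp hR
      rw [if_neg (by rintro ⟨hmem, _⟩; exact hB hmem)]
      by_cases hsb : reachF grid oh r c = true
      · -- blue was already there earlier: the red insert is skipped
        rw [if_neg (by rintro ⟨_, hp⟩
                       rw [pv_contains_true ((h.sb_mem c).mpr hsb)] at hp; simp at hp)]
        cases hfb : fstR grid oh r c with
        | none => exact absurd (fstR_none_iff.mp hfb) (by simp [hsb])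
        | some j =>
          have hj := fstR_some_spec hfb
          have hnotb : ¬ newAt grid oh (r + 1) c := fun hne => absurd hsb (by simp [hne.2])
          unfold expOwner
          rw [fstR_none_iff.mpr hnR.2, hfb, fstR_new hnR, fstR_not_new hnotb, hfb]
          have h1 : ¬ (r + 1 < j) := by omega
          have h2 : j < r + 1 := by omega
          simp [h1, h2]
      · -- genuinely red-first: owner[c] := 1
        rw [if_pos ⟨hR, by
          rw [pv_contains_false (fun hmem => hsb ((h.sb_mem c).mp hmem)),
            pv_contains_false hB]; rfl⟩]
        have hnotb : ¬ newAt grid oh (r + 1) c := fun hne => hB ((hNB c).mpr hne)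
        unfold expOwner
        rw [fstR_new hnR, fstR_not_new hnotb, fstR_none_iff.mpr (by simpa using hsb)]
    · -- blue reaches c this round, red does not
      have hnB := (hNB c).mp hB
      by_cases hsr : reachF grid mh r c = true
      · rw [if_neg (by rintro ⟨_, hp⟩
                       rw [pv_contains_true ((h.sr_mem c).mpr hsr)] at hp; simp at hp),
          if_neg (by rintro ⟨hmem, _⟩; exact hR hmem)]
        cases hfr : fstR grid mh r c with
        | none => exact absurd (fstR_none_iff.mp hfr) (by simp [hsr])
        | some i =>
          have hi := fstR_some_spec hfr
          have hnotr : ¬ newAt grid mh (r + 1) c := fun hne => absurd hsr (by simp [hne.2])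
          unfold expOwner
          rw [hfr, fstR_none_iff.mpr hnB.2, fstR_not_new hnotr, hfr, fstR_new hnB]
          have h1 : i < r + 1 := by omega
          simp [h1]
      · rw [if_pos ⟨hB, by
          rw [pv_contains_false (fun hmem => hsr ((h.sr_mem c).mp hmem)),
            pv_contains_false hR]; rfl⟩]
        have hnotr : ¬ newAt grid mh (r + 1) c := fun hne => hR ((hNR c).mpr hne)
        unfold expOwner
        rw [fstR_new hnB, fstR_not_new hnotr, fstR_none_iff.mpr (by simpa using hsr)]
    · -- untouched this round
      rw [if_neg (by rintro ⟨hmem, _⟩; exact hB hmem),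
        if_neg (by rintro ⟨hmem, _⟩; exact hR hmem)]
      have hnotr : ¬ newAt grid mh (r + 1) c := fun hne => hR ((hNR c).mpr hne)
      have hnotb : ¬ newAt grid oh (r + 1) c := fun hne => hB ((hNB c).mpr hne)
      unfold expOwner
      rw [fstR_not_new hnotr, fstR_not_new hnotb]

theorem get?_foldl_insert (v : Int) (l : List (Int × Int))
    (ow : PySem.Dict (Int × Int) Int) (y : Int × Int) :
    (l.foldl (fun ow c => PySem.Dict.insert ow c v) ow).get? y =
      if y ∈ l then some v else ow.get? y := by
  induction l generalizing ow with
  | nil => simp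
  | cons a l ih =>
    simp only [List.foldl_cons, ih]
    by_cases hmem : y ∈ l
    · rw [if_pos hmem, if_pos (List.mem_cons_of_mem _ hmem)]
    · rw [if_neg hmem, PySem.Dict.get?_insert]
      by_cases hya : y = a
      · rw [if_pos hya, if_pos (by rw [hya]; exact List.mem_cons_self)]
      · rw [if_neg hya, if_neg (by rintro h
                                   rcases List.mem_cons.mp h with h' | h'
                                   · exact hya h'
                                   · exact hmem h')]

def pvInit (grid : List (List String)) (mh oh : Int × Int) : PvSt :=
  let sr0 : PySem.Set (Int × Int) :=
    if pvOpenB grid mh then PySem.Set.add PySem.Set.empty mh else PySem.Set.empty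
  let sb0 : PySem.Set (Int × Int) :=
    if pvOpenB grid oh then PySem.Set.add PySem.Set.empty oh else PySem.Set.empty
  let ow0 := (PySem.Set.diff sr0 sb0).foldl
    (fun ow c => PySem.Dict.insert ow c 1) PySem.Dict.empty
  let ow1 := (PySem.Set.diff sb0 sr0).foldl
    (fun ow c => PySem.Dict.insert ow c (-1)) ow0
  ⟨sr0, sb0, sr0, sb0, ow1⟩

theorem mem_init_set {grid : List (List String)} {s c : Int × Int} :
    c ∈ (if pvOpenB grid s then PySem.Set.add PySem.Set.empty s else PySem.Set.empty) ↔
      reachF grid s 0 c = true := by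
  rw [reach_zero_iff]
  by_cases hop : pvOpenB grid s = true
  · rw [if_pos hop]
    have : PySem.Set.add PySem.Set.empty s = [s] := rfl
    rw [this]
    simp [pvOpenB_eq grid s ▸ hop]
  · rw [if_neg hop]
    constructor
    · intro h; exact absurd h (by simp [PySem.Set.empty])
    · rintro ⟨rfl, hv⟩; exact (hop (by rw [pvOpenB_eq]; exact hv)).elim

theorem bInv_init (grid : List (List String)) (mh oh : Int × Int) :
    BInv grid mh oh 0 (pvInit grid mh oh) := by
  have hndr : (if pvOpenB grid mh then PySem.Set.add PySem.Set.empty mh else PySem.Set.empty).Nodup := by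
    split <;> simp [PySem.Set.empty]
  have hndb : (if pvOpenB grid oh then PySem.Set.add PySem.Set.empty oh else PySem.Set.empty).Nodup := by
    split <;> simp [PySem.Set.empty]
  refine ⟨hndr, hndb, hndr, hndb, fun c => mem_init_set, fun c => mem_init_set,
    fun c => mem_init_set, fun c => mem_init_set, fun c => ?_⟩
  show ((PySem.Set.diff _ _).foldl _ ((PySem.Set.diff _ _).foldl _ PySem.Dict.empty)).get? c = _
  rw [get?_foldl_insert, get?_foldl_insert]
  have hR : c ∈ (if pvOpenB grid mh then PySem.Set.add PySem.Set.empty mh else PySem.Set.empty) ↔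
      reachF grid mh 0 c = true := mem_init_set
  have hB : c ∈ (if pvOpenB grid oh then PySem.Set.add PySem.Set.empty oh else PySem.Set.empty) ↔
      reachF grid oh 0 c = true := mem_init_set
  unfold expOwner fstR
  by_cases hr : reachF grid mh 0 c = true <;> by_cases hb : reachF grid oh 0 c = true
  · rw [if_neg (by rw [PySem.Set.mem_diff _ _ _]; rintro ⟨_, h2⟩; exact h2 (hR.mpr hr)),
      if_neg (by rw [PySem.Set.mem_diff _ _ _]; rintro ⟨_, h2⟩; exact h2 (hB.mpr hb))]
    simp [hr, hb, PySem.Dict.get?_empty]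
  · rw [if_neg (by rw [PySem.Set.mem_diff _ _ _]; rintro ⟨h1, _⟩; exact hb (hB.mp h1)),
      if_pos (by rw [PySem.Set.mem_diff _ _ _]; exact ⟨hR.mpr hr, fun h1 => hb (hB.mp h1)⟩)]
    simp [hr, hb]
  · rw [if_pos (by rw [PySem.Set.mem_diff _ _ _]; exact ⟨hB.mpr hb, fun h1 => hr (hR.mp h1)⟩)]
    simp [hr, hb]
  · rw [if_neg (by rw [PySem.Set.mem_diff _ _ _]; rintro ⟨h1, _⟩; exact hb (hB.mp h1)),
      if_neg (by rw [PySem.Set.mem_diff _ _ _]; rintro ⟨h1, _⟩; exact hr (hR.mp h1))]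
    simp [hr, hb, PySem.Dict.get?_empty]

theorem bInv_iter (grid : List (List String)) (mh oh : Int × Int) (n : Nat) :
    BInv grid mh oh n
      ((List.range n).foldl (fun st _ => pvRound grid st) (pvInit grid mh oh)) := by
  induction n with
  | zero => exact bInv_init grid mh oh
  | succ n ih =>
    rw [List.range_succ, List.foldl_append]
    exact bInv_round ih

theorem expOwner_ss {grid : List (List String)} {mh oh : Int × Int} {r i j : Nat}
    {c : Int × Int} (h1 : fstR grid mh r c = some i) (h2 : fstR grid oh r c = some j) :
    expOwner grid mh oh r c =
      if i < j then some 1 else if j < i then some (-1) else none := by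
  unfold expOwner; rw [h1, h2]

theorem expOwner_sn {grid : List (List String)} {mh oh : Int × Int} {r i : Nat}
    {c : Int × Int} (h1 : fstR grid mh r c = some i) (h2 : fstR grid oh r c = none) :
    expOwner grid mh oh r c = some 1 := by
  unfold expOwner; rw [h1, h2]

theorem expOwner_ns {grid : List (List String)} {mh oh : Int × Int} {r j : Nat}
    {c : Int × Int} (h1 : fstR grid mh r c = none) (h2 : fstR grid oh r c = some j) :
    expOwner grid mh oh r c = some (-1) := by
  unfold expOwner; rw [h1, h2]

theorem expOwner_nn {grid : List (List String)} {mh oh : Int × Int} {r : Nat}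
    {c : Int × Int} (h1 : fstR grid mh r c = none) (h2 : fstR grid oh r c = none) :
    expOwner grid mh oh r c = none := by
  unfold expOwner; rw [h1, h2]

-- the per-cell equality of the two scoring bodies, for an in-bounds cell
theorem percell {grid : List (List String)} {mh oh : Int × Int} {x y : Int}
    (hx0 : 0 ≤ x) (hxw : x < pvW grid) (hy0 : 0 ≤ y) (hyh : y < (grid.length : Int))
    (score : Int) :
    (if !(pvCell grid x y == ".") then score
     else
       if pvLt (pvMget (bfs_distance_map grid mh) x y) (pvMget (bfs_distance_map grid oh) x y) then
         score + (1 + open_neighbor_bonus grid x y)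
       else if pvLt (pvMget (bfs_distance_map grid oh) x y) (pvMget (bfs_distance_map grid mh) x y) then
         score - (1 + open_neighbor_bonus grid x y)
       else score) =
    (if pvCell grid x y == "." then
       score + (PySem.Dict.getD ((List.range (grid.length * (grid.headD []).length)).foldl
           (fun st _ => pvRound grid st) (pvInit grid mh oh)).ow (x, y) 0) *
         (1 + (((pvNbrs (x, y)).filter (fun n => pvOpenB grid n)).length : Int))
     else score) := by
  by_cases hcell : (pvCell grid x y == ".") = true
  case neg =>
    rw [if_pos (by simp [hcell]), if_neg hcell]
  case pos =>
    rw [if_neg (by simp [hcell]), if_pos hcell]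
    have hinb : pvInb grid (x, y) := ⟨hx0, hxw, hy0, hyh⟩
    have hbonus : open_neighbor_bonus grid x y =
        (((pvNbrs (x, y)).filter (fun n => pvOpenB grid n)).length : Int) := by
      unfold open_neighbor_bonus
      rw [PySem.List.foldl_if_add_one, pvNbrs_eq_map, ← List.countP_eq_length_filter,
        List.countP_map]
      simp only [zero_add]
      rfl
    have how := (bInv_iter grid mh oh (grid.length * (grid.headD []).length)).ow_get (x, y)
    rw [PySem.Dict.getD_eq_get?_getD, how]
    cases hrd : pvMget (bfs_distance_map grid mh) x y with
    | some vr =>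
      obtain ⟨hreachr, hleastr, hboundr⟩ := bfs_some_least hrd hinb
      have hfr : fstR grid mh (grid.length * (grid.headD []).length) (x, y) = some vr :=
        fstR_least hreachr hleastr (by omega)
      cases hbd : pvMget (bfs_distance_map grid oh) x y with
      | some vb =>
        obtain ⟨hreachb, hleastb, hboundb⟩ := bfs_some_least hbd hinb
        have hfb : fstR grid oh (grid.length * (grid.headD []).length) (x, y) = some vb :=
          fstR_least hreachb hleastb (by omega)
        rw [expOwner_ss hfr hfb]
        rcases lt_trichotomy vr vb with hlt | heq | hgt
        · rw [if_pos (by simp [pvLt, hlt]), if_pos hlt]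
          rw [← hbonus]; simp only [Option.getD_some]; ring
        · subst heq
          rw [if_neg (by simp [pvLt]), if_neg (by simp [pvLt]),
            if_neg (by omega), if_neg (by omega)]
          simp
        · rw [if_neg (by simp [pvLt]; omega), if_pos (by simp [pvLt, hgt]),
            if_neg (by omega), if_pos hgt]
          rw [← hbonus]; simp only [Option.getD_some]; ring
      | none =>
        have hnb := bfs_none hbd hinb
        have hfb : fstR grid oh (grid.length * (grid.headD []).length) (x, y) = none :=
          fstR_none_iff.mpr (hnb _)
        rw [expOwner_sn hfr hfb, if_pos (by simp [pvLt])]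
        rw [← hbonus]; simp only [Option.getD_some]; ring
    | none =>
      have hnr := bfs_none hrd hinb
      have hfr : fstR grid mh (grid.length * (grid.headD []).length) (x, y) = none :=
        fstR_none_iff.mpr (hnr _)
      cases hbd : pvMget (bfs_distance_map grid oh) x y with
      | some vb =>
        obtain ⟨hreachb, hleastb, hboundb⟩ := bfs_some_least hbd hinb
        have hfb : fstR grid oh (grid.length * (grid.headD []).length) (x, y) = some vb :=
          fstR_least hreachb hleastb (by omega)
        rw [expOwner_ns hfr hfb, if_neg (by simp [pvLt]), if_pos (by simp [pvLt])]
        rw [← hbonus]; simp only [Option.getD_some]; ring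
      | none =>
        have hnb := bfs_none hbd hinb
        have hfb : fstR grid oh (grid.length * (grid.headD []).length) (x, y) = none :=
          fstR_none_iff.mpr (hnb _)
        rw [expOwner_nn hfr hfb, if_neg (by simp [pvLt]), if_neg (by simp [pvLt])]
        simp

theorem evalA_eq (grid : List (List String)) (mh oh : Int × Int) :
    evaluate_voronoi grid mh oh =
    (PySem.List.pyRange 0 (grid.length : Int) 1).foldl (fun score y =>
      (PySem.List.pyRange 0 (pvW grid) 1).foldl (fun score x =>
        if !(pvCell grid x y == ".") then score
        else if pvLt (pvMget (bfs_distance_map grid mh) x y)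
            (pvMget (bfs_distance_map grid oh) x y) then
          score + (1 + open_neighbor_bonus grid x y)
        else if pvLt (pvMget (bfs_distance_map grid oh) x y)
            (pvMget (bfs_distance_map grid mh) x y) then
          score - (1 + open_neighbor_bonus grid x y)
        else score) score) 0 := rfl

theorem evalB_eq (grid : List (List String)) (mh oh : Int × Int) :
    evaluate_voronoi_alt grid mh oh =
    (PySem.List.pyRange 0 (grid.length : Int) 1).foldl (fun score y =>
      (PySem.List.pyRange 0 (pvW grid) 1).foldl (fun score x =>
        if pvCell grid x y == "." then
          score + (PySem.Dict.getD ((List.range (grid.length * (grid.headD []).length)).foldl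
              (fun st _ => pvRound grid st) (pvInit grid mh oh)).ow (x, y) 0) *
            (1 + (((pvNbrs (x, y)).filter (fun n => pvOpenB grid n)).length : Int))
        else score) score) 0 := rfl

-- ===== VERDICT (by name: the statement is the Claim_ definition above) =====
theorem evaluate_voronoi_spec : Claim_equal_evaluate_voronoi := by
  intro grid mh oh _ _
  show evaluate_voronoi grid mh oh = evaluate_voronoi_alt grid mh oh
  rw [evalA_eq, evalB_eq]
  apply PySem.List.foldl_congr_mem
  intro acc y hy
  apply PySem.List.foldl_congr_mem
  intro acc2 x hx
  rcases (PySem.List.mem_pyRange_one).mp hy with ⟨hy0, hyh⟩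
  rcases (PySem.List.mem_pyRange_one).mp hx with ⟨hx0, hxw⟩
  exact percell hx0 hxw hy0 hyh acc2
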